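-- pv_equiv track=rewrite | github.com/Semeriuss/A2SV-Labs | contest_problems/code_forces_15/A.py | unique
-- ===== SOURCE A (Python) =====
-- def unique(nums):
--     visited = set()
--     count = 0
--     for num in nums:
--         if num not in visited:
--             count += 1
--             visited.add(num)
--         elif -num not in visited:
--             count += 1
--             visited.add(-num)
--
--     return count
-- ===== SOURCE B (Python) =====
-- def unique(nums):
--     count = {}
--     for num in nums:
--         count[num] = count.get(num, 0) + 1
--     total = 0
--     for v, c in count.items():
--         if v == 0:
--             total += 1
--         elif -v in count:
--             total += 1
--         else:
--             total += min(2, c)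
--     return total
-- ===== Notes on version B (the rewrite author's own statement) =====
-- stated objective: alternative
-- what changed: Replaces A's sequential placement into a growing visited-set (with the -num fallback slot) by a two-phase strategy: build a frequency table in one pass, then sum per distinct value a capped group weight (1 for zero, 1 per key whose negation is also a key, else min(2, count)).
import Mathlib
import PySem

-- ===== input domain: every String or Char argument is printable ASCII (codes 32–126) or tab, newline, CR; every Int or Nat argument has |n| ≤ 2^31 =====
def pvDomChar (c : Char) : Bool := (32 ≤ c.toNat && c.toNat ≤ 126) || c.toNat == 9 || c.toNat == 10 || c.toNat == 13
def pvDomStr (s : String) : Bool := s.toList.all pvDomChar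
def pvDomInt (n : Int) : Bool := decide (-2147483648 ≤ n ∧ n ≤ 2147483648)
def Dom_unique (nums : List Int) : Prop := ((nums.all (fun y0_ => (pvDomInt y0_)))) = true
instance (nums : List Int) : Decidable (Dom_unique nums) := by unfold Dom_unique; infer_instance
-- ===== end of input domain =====

-- B replaces A's sequential placement into a growing visited-set by a two-phase strategy
-- (frequency table in one pass, then a capped weighted sum over the distinct values); alternative decomposition, same cost.

-- ===== PORT A =====
def uniqueStep (st : PySem.Set Int × Int) (num : Int) : PySem.Set Int × Int :=
  if PySem.Set.contains st.1 num = false then (PySem.Set.add st.1 num, st.2 + 1)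
  else if PySem.Set.contains st.1 (-num) = false then (PySem.Set.add st.1 (-num), st.2 + 1)
  else st

def unique (nums : List Int) : Int :=
  (nums.foldl uniqueStep (PySem.Set.empty, 0)).2

-- ===== PORT B =====
def unique_alt (nums : List Int) : Int :=
  let count : PySem.Dict Int Int :=
    nums.foldl (fun d num => d.insert num (d.getD num 0 + 1)) PySem.Dict.empty
  count.items.foldl (fun total vc =>
    if vc.1 = 0 then total + 1
    else if count.contains (-vc.1) then total + 1
    else total + min 2 vc.2) 0

-- ===== PRECONDITION & SPEC =====
def Spec_unique (nums : List Int) (out : Int) : Prop := out = unique_alt nums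
instance (nums : List Int) (out : Int) : Decidable (Spec_unique nums out) := by unfold Spec_unique; infer_instance

-- ===== CLAIM (what is proved, stated in full; the proofs are below) =====
def Claim_equal_unique : Prop := ∀ (nums : List Int), Dom_unique nums → Spec_unique nums (unique nums)

-- ===== LEMMAS AND PROOFS =====

-- weight of a distinct value v in list l (B's per-key summand)
def pvW (l : List Int) (v : Int) : Int :=
  if v = 0 then 1 else if -v ∈ l then 1 else min 2 ((List.count v l : Int))

-- the common value both programs compute
def pvG (l : List Int) : Int := ((PySem.Set.ofList l).map (pvW l)).sum

-- number of occurrences of x or -x in l (x ≠ 0)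
def pvKey (l : List Int) (x : Int) : Int := (List.count x l : Int) + (List.count (-x) l : Int)

-- how many of {y, -y} are in the visited set
def pvM (s : List Int) (y : Int) : Int := (if y ∈ s then 1 else 0) + (if -y ∈ s then 1 else 0)

lemma count_append_single (p : List Int) (x y : Int) :
    List.count y (p ++ [x]) = List.count y p + (if x = y then 1 else 0) := by
  simp [List.count_append, List.count_singleton']

lemma ofList_append_single (p : List Int) (x : Int) :
    PySem.Set.ofList (p ++ [x]) = PySem.Set.add (PySem.Set.ofList p) x := by
  rw [PySem.Set.ofList_eq_foldl, PySem.Set.ofList_eq_foldl, List.foldl_append]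
  simp

lemma sum_map_single_diff (S : List Int) (f g : Int → Int) (x : Int)
    (hnd : S.Nodup) (hx : x ∈ S) (h : ∀ v ∈ S, v ≠ x → f v = g v) :
    (S.map f).sum = (S.map g).sum + (f x - g x) := by
  induction S with
  | nil => cases hx
  | cons a t ih =>
    rcases List.mem_cons.mp hx with rfl | hxt
    · have hat : x ∉ t := (List.nodup_cons.mp hnd).1
      have ht : ∀ v ∈ t, f v = g v := fun v hv =>
        h v (List.mem_cons_of_mem _ hv) (fun e => hat (e ▸ hv))
      simp [List.map_congr_left ht]; ring
    · have hat : a ∉ t := (List.nodup_cons.mp hnd).1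
      have hax : a ≠ x := fun e => hat (e ▸ hxt)
      have ha : f a = g a := h a (List.mem_cons_self) hax
      rw [List.map_cons, List.map_cons, List.sum_cons, List.sum_cons, ha,
        ih (List.nodup_cons.mp hnd).2 hxt (fun v hv hvx => h v (List.mem_cons_of_mem _ hv) hvx)]
      ring

lemma pvW_append_other (p : List Int) (x v : Int) (hvx : v ≠ x) (hvnx : v ≠ -x) :
    pvW (p ++ [x]) v = pvW p v := by
  unfold pvW
  by_cases hv : v = 0
  · simp [hv]
  · have h1 : (-v ∈ p ++ [x]) ↔ -v ∈ p := by
      simp only [List.mem_append, List.mem_singleton]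
      constructor
      · rintro (h | h)
        · exact h
        · exact absurd (by omega : v = -x) hvnx
      · exact Or.inl
    have hxv : ¬ x = v := fun e => hvx e.symm
    rw [count_append_single, if_neg hxv]
    simp [h1, hv]


lemma pvKey_nonneg (p : List Int) (x : Int) : 0 ≤ pvKey p x := by
  unfold pvKey; positivity

lemma pvKey_neg (p : List Int) (x : Int) : pvKey p (-x) = pvKey p x := by
  unfold pvKey; rw [neg_neg]; ring

lemma pvM_neg (s : List Int) (y : Int) : pvM s (-y) = pvM s y := by
  unfold pvM; rw [neg_neg]; ring

lemma pvKey_append (p : List Int) (x y : Int) :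
    pvKey (p ++ [x]) y = pvKey p y + (if x = y then 1 else 0) + (if x = -y then 1 else 0) := by
  unfold pvKey
  rw [count_append_single, count_append_single]
  push_cast
  split_ifs <;> ring

lemma pvM_add_of_ne (s : PySem.Set Int) (x y : Int) (h1 : y ≠ x) (h2 : -y ≠ x) :
    pvM (PySem.Set.add s x) y = pvM s y := by
  unfold pvM
  simp [PySem.Set.mem_add, h1, h2]

-- the change in pvG when one element is appended
lemma pvG_append (p : List Int) (x : Int) :
    pvG (p ++ [x]) = pvG p + (if x = 0 then (if (0:Int) ∈ p then 0 else 1)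
      else min 2 (pvKey p x + 1) - min 2 (pvKey p x)) := by
  by_cases hx0 : x = 0
  · subst hx0
    by_cases h0p : (0:Int) ∈ p
    · have hcong : ∀ v ∈ PySem.Set.ofList p, pvW (p ++ [0]) v = pvW p v := by
        intro v hv
        by_cases hv0 : v = 0
        · simp [pvW, hv0]
        · exact pvW_append_other p 0 v hv0 (by simpa using hv0)
      rw [pvG, pvG, ofList_append_single, PySem.Set.add_of_mem ((PySem.Set.mem_ofList _ _).mpr h0p),
        List.map_congr_left hcong]
      simp [h0p]
    · have hcong : ∀ v ∈ PySem.Set.ofList p, pvW (p ++ [0]) v = pvW p v := by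
        intro v hv
        have hv0 : v ≠ 0 := fun e => h0p (e ▸ (PySem.Set.mem_ofList _ _).mp hv)
        exact pvW_append_other p 0 v hv0 (by simpa using hv0)
      rw [pvG, pvG, ofList_append_single,
        PySem.Set.add_of_not_mem (fun h => h0p ((PySem.Set.mem_ofList _ _).mp h)),
        List.map_append, List.sum_append, List.map_congr_left hcong]
      simp [h0p, pvW]
  · have hnxx : ¬ (-x = x) := by omega
    by_cases hxp : x ∈ p
    · have hset : PySem.Set.ofList (p ++ [x]) = PySem.Set.ofList p := by
        rw [ofList_append_single, PySem.Set.add_of_mem ((PySem.Set.mem_ofList _ _).mpr hxp)]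
      have hcnt : (0:Int) < List.count x p := by exact_mod_cast List.count_pos_iff.mpr hxp
      by_cases hnxp : -x ∈ p
      · -- both signs already present: nothing changes
        have hcong : ∀ v ∈ PySem.Set.ofList p, pvW (p ++ [x]) v = pvW p v := by
          intro v hv
          by_cases hvx : v = x
          · subst hvx
            simp [pvW, hx0, List.mem_append, hnxp]
          · by_cases hvnx : v = -x
            · subst hvnx
              simp [pvW, neg_neg, show ¬ (-x = 0) by omega, List.mem_append, hxp]
            · exact pvW_append_other p x v hvx hvnx
        rw [pvG, pvG, hset, List.map_congr_left hcong]
        have hcnt2 : (0:Int) < List.count (-x) p := by exact_mod_cast List.count_pos_iff.mpr hnxp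
        have hk : 2 ≤ pvKey p x := by unfold pvKey; omega
        rw [if_neg hx0]; omega
      · -- only the weight at x changes
        have hxS : x ∈ PySem.Set.ofList p := (PySem.Set.mem_ofList _ _).mpr hxp
        have hcong : ∀ v ∈ PySem.Set.ofList p, v ≠ x → pvW (p ++ [x]) v = pvW p v := by
          intro v hv hvx
          have hvnx : v ≠ -x := fun e => hnxp (e ▸ (PySem.Set.mem_ofList _ _).mp hv)
          exact pvW_append_other p x v hvx hvnx
        rw [pvG, pvG, hset,
          sum_map_single_diff _ _ _ x (PySem.Set.nodup_ofList p) hxS hcong]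
        have hc0 : List.count (-x) p = 0 := List.count_eq_zero.mpr hnxp
        have hW1 : pvW (p ++ [x]) x = min 2 ((List.count x p : Int) + 1) := by
          simp [pvW, hx0, List.mem_append, hnxp, hnxx]
        have hW2 : pvW p x = min 2 ((List.count x p : Int)) := by
          simp [pvW, hx0, hnxp]
        rw [hW1, hW2, if_neg hx0]
        unfold pvKey
        rw [hc0]
        ring_nf
    · -- x is a new value
      have hxS : x ∉ PySem.Set.ofList p := fun h => hxp ((PySem.Set.mem_ofList _ _).mp h)
      have hset : PySem.Set.ofList (p ++ [x]) = PySem.Set.ofList p ++ [x] := by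
        rw [ofList_append_single, PySem.Set.add_of_not_mem hxS]
      have hcx : List.count x p = 0 := List.count_eq_zero.mpr hxp
      have hWx : pvW (p ++ [x]) x = 1 := by
        by_cases hnxp : -x ∈ p
        · simp [pvW, hx0, List.mem_append, hnxp]
        · simp [pvW, hx0, List.mem_append, hnxp, hnxx, hcx]
      by_cases hnxp : -x ∈ p
      · have hnxS : -x ∈ PySem.Set.ofList p := (PySem.Set.mem_ofList _ _).mpr hnxp
        have hcong : ∀ v ∈ PySem.Set.ofList p, v ≠ -x → pvW (p ++ [x]) v = pvW p v := by
          intro v hv hvnx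
          have hvx : v ≠ x := fun e => hxp (e ▸ (PySem.Set.mem_ofList _ _).mp hv)
          exact pvW_append_other p x v hvx hvnx
        rw [pvG, pvG, hset, List.map_append, List.sum_append,
          sum_map_single_diff _ _ _ (-x) (PySem.Set.nodup_ofList p) hnxS hcong]
        have hWnx1 : pvW (p ++ [x]) (-x) = 1 := by
          simp [pvW, show ¬ (-x = 0) by omega, neg_neg, List.mem_append]
        have hWnx2 : pvW p (-x) = min 2 ((List.count (-x) p : Int)) := by
          simp [pvW, show ¬ (-x = 0) by omega, neg_neg, hxp]
        have hcnt2 : (0:Int) < List.count (-x) p := by exact_mod_cast List.count_pos_iff.mpr hnxp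
        rw [hWnx1, hWnx2, if_neg hx0]
        simp only [List.map_cons, List.map_nil, List.sum_cons, List.sum_nil, hWx]
        unfold pvKey
        rw [hcx]
        push_cast
        omega
      · have hcong : ∀ v ∈ PySem.Set.ofList p, pvW (p ++ [x]) v = pvW p v := by
          intro v hv
          have hvx : v ≠ x := fun e => hxp (e ▸ (PySem.Set.mem_ofList _ _).mp hv)
          have hvnx : v ≠ -x := fun e => hnxp (e ▸ (PySem.Set.mem_ofList _ _).mp hv)
          exact pvW_append_other p x v hvx hvnx
        have hcnx : List.count (-x) p = 0 := List.count_eq_zero.mpr hnxp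
        rw [pvG, pvG, hset, List.map_append, List.sum_append, List.map_congr_left hcong,
          if_neg hx0]
        simp only [List.map_cons, List.map_nil, List.sum_cons, List.sum_nil, hWx]
        unfold pvKey
        rw [hcx, hcnx]
        simp

lemma pvKey_append_of_ne (p : List Int) (x y : Int) (h1 : x ≠ y) (h2 : x ≠ -y) :
    pvKey (p ++ [x]) y = pvKey p y := by
  rw [pvKey_append, if_neg h1, if_neg h2]; ring

lemma pvKey_append_self (p : List Int) (x : Int) (hx0 : x ≠ 0) :
    pvKey (p ++ [x]) x = pvKey p x + 1 := by
  rw [pvKey_append, if_pos rfl, if_neg (show x ≠ -x by omega)]; ring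

lemma pvKey_append_negself (p : List Int) (x : Int) (hx0 : x ≠ 0) :
    pvKey (p ++ [x]) (-x) = pvKey p x + 1 := by
  rw [pvKey_append, pvKey_neg, neg_neg, if_neg (show x ≠ -x by omega), if_pos rfl]; ring

-- invariant induction over A's loop
lemma unique_loop (l : List Int) : ∀ (p : List Int) (s : PySem.Set Int) (c : Int),
    (∀ y : Int, y ≠ 0 → pvM s y = min 2 (pvKey p y)) →
    ((0:Int) ∈ s ↔ (0:Int) ∈ p) →
    (l.foldl uniqueStep (s, c)).2 = c + (pvG (p ++ l) - pvG p) := by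
  induction l with
  | nil => intro p s c _ _; simp
  | cons x tl ih =>
    intro p s c hM h0
    have hrw : p ++ x :: tl = (p ++ [x]) ++ tl := by simp
    rw [List.foldl_cons, hrw]
    by_cases hx : x ∈ s
    · by_cases hnx : -x ∈ s
      · -- both slots taken: skip
        have hstep : uniqueStep (s, c) x = (s, c) := by
          unfold uniqueStep
          simp [hx, hnx]
        have hG : pvG (p ++ [x]) = pvG p := by
          rw [pvG_append]
          by_cases hx0 : x = 0
          · have h0p : (0:Int) ∈ p := h0.mp (hx0 ▸ hx)
            simp [hx0, h0p]
          · have h2 : pvM s x = 2 := by unfold pvM; simp [hx, hnx]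
            have hMx := hM x hx0
            have hk := pvKey_nonneg p x
            rw [if_neg hx0]
            omega
        rw [hstep, ih (p ++ [x]) s c ?_ ?_, hG]
        · intro y hy
          by_cases hyx : y = x
          · subst hyx
            rw [pvKey_append_self p y hy]
            have h2 : pvM s y = 2 := by unfold pvM; simp [hx, hnx]
            have hMx := hM y hy
            have hk := pvKey_nonneg p y
            omega
          · by_cases hynx : y = -x
            · subst hynx
              have hx0 : x ≠ 0 := by omega
              rw [pvM_neg, pvKey_append_negself p x hx0]
              have h2 : pvM s x = 2 := by unfold pvM; simp [hx, hnx]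
              have hMx := hM x hx0
              have hk := pvKey_nonneg p x
              omega
            · rw [pvKey_append_of_ne p x y (fun e => hyx e.symm) (fun e => hynx (by omega))]
              exact hM y hy
        · simp only [List.mem_append, List.mem_singleton]
          constructor
          · exact fun h => Or.inl (h0.mp h)
          · rintro (h | h)
            · exact h0.mpr h
            · exact h ▸ hx
      · -- second slot -x is free
        have hx0 : x ≠ 0 := fun e => hnx (by rw [e, neg_zero]; exact e ▸ hx)
        have hstep : uniqueStep (s, c) x = (PySem.Set.add s (-x), c + 1) := by
          unfold uniqueStep
          simp [hx, hnx]
        have h1 : pvM s x = 1 := by unfold pvM; simp [hx, hnx]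
        have hMx := hM x hx0
        have hk := pvKey_nonneg p x
        have hG : pvG (p ++ [x]) = pvG p + 1 := by
          rw [pvG_append, if_neg hx0]
          omega
        have hkey : pvM (PySem.Set.add s (-x)) x = 2 := by
          unfold pvM
          simp [PySem.Set.mem_add, hx]
        rw [hstep, ih (p ++ [x]) (PySem.Set.add s (-x)) (c + 1) ?_ ?_, hG]
        · ring
        · intro y hy
          by_cases hyx : y = x
          · subst hyx
            rw [pvKey_append_self p y hy, hkey]
            omega
          · by_cases hynx : y = -x
            · subst hynx
              rw [pvM_neg, pvKey_append_negself p x hx0, hkey]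
              omega
            · rw [pvM_add_of_ne s (-x) y (by omega) (by omega),
                pvKey_append_of_ne p x y (fun e => hyx e.symm) (fun e => hynx (by omega))]
              exact hM y hy
        · simp [PySem.Set.mem_add, List.mem_append,
            show ¬(0:Int) = -x by omega, show ¬(0:Int) = x by omega, h0]
    · -- first slot x is free
      have hstep : uniqueStep (s, c) x = (PySem.Set.add s x, c + 1) := by
        unfold uniqueStep
        simp [hx]
      have h1 : pvM s x = (if -x ∈ s then 1 else 0) := by unfold pvM; simp [hx]
      have hG : pvG (p ++ [x]) = pvG p + 1 := by
        by_cases hx0 : x = 0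
        · have h0p : (0:Int) ∉ p := fun h => hx (hx0 ▸ h0.mpr h)
          rw [pvG_append]
          simp [hx0, h0p]
        · have hMx := hM x hx0
          have hk := pvKey_nonneg p x
          rw [pvG_append, if_neg hx0]
          by_cases hnx2 : -x ∈ s
          · rw [if_pos hnx2] at h1; omega
          · rw [if_neg hnx2] at h1; omega
      have hkey : ∀ hx0 : x ≠ 0, pvM (PySem.Set.add s x) x = min 2 (pvKey p x + 1) := by
        intro hx0
        have hMx := hM x hx0
        have hk := pvKey_nonneg p x
        have h2 : pvM (PySem.Set.add s x) x = 1 + (if -x ∈ s then 1 else 0) := by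
          unfold pvM
          simp [PySem.Set.mem_add, show ¬(-x = x) by omega]
        by_cases hnx2 : -x ∈ s
        · rw [if_pos hnx2] at h1 h2; omega
        · rw [if_neg hnx2] at h1 h2; omega
      rw [hstep, ih (p ++ [x]) (PySem.Set.add s x) (c + 1) ?_ ?_, hG]
      · ring
      · intro y hy
        by_cases hyx : y = x
        · subst hyx
          rw [pvKey_append_self p y hy, hkey hy]
        · by_cases hynx : y = -x
          · subst hynx
            have hx0 : x ≠ 0 := by omega
            rw [pvM_neg, pvKey_append_negself p x hx0, hkey hx0]
          · rw [pvM_add_of_ne s x y hyx (by omega),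
              pvKey_append_of_ne p x y (fun e => hyx e.symm) (fun e => hynx (by omega))]
            exact hM y hy
      · simp [PySem.Set.mem_add, List.mem_append, h0]

lemma unique_eq_pvG (nums : List Int) : unique nums = pvG nums := by
  have h := unique_loop nums [] PySem.Set.empty 0
    (by intro y hy; simp [pvM, pvKey, PySem.Set.empty]) (by simp [PySem.Set.empty])
  simpa [unique, pvG] using h

lemma foldl_body (d : PySem.Dict Int Int) (l : List (Int × Int)) (t : Int) :
    l.foldl (fun total vc => if vc.1 = 0 then total + 1
      else if d.contains (-vc.1) then total + 1 else total + min 2 vc.2) t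
    = t + (l.map (fun vc => if vc.1 = 0 then (1:Int)
      else if d.contains (-vc.1) then 1 else min 2 vc.2)).sum := by
  induction l generalizing t with
  | nil => simp
  | cons hd tl ih =>
    rw [List.foldl_cons, ih, List.map_cons, List.sum_cons]
    split_ifs <;> ring

lemma unique_alt_eq_pvG (nums : List Int) : unique_alt nums = pvG nums := by
  have h1 : unique_alt nums = (PySem.Dict.counter nums).items.foldl
      (fun total vc => if vc.1 = 0 then total + 1
        else if (PySem.Dict.counter nums).contains (-vc.1) then total + 1
        else total + min 2 vc.2) 0 := by
    simp only [unique_alt]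
    rw [PySem.Dict.foldl_insert_getD_add_one_eq_counter]
  rw [h1, foldl_body, PySem.Dict.items_counter, List.map_map]
  have hcong : ∀ k ∈ PySem.Set.ofList nums,
      ((fun vc : Int × Int => if vc.1 = 0 then (1:Int)
        else if (PySem.Dict.counter nums).contains (-vc.1) then 1 else min 2 vc.2) ∘
        (fun k => (k, (List.count k nums : Int)))) k = pvW nums k := by
    intro k _
    simp only [Function.comp_apply, pvW, PySem.Dict.contains_counter]
    by_cases hk0 : k = 0
    · simp [hk0]
    · by_cases hm : -k ∈ nums <;> simp [hk0, hm]
  rw [List.map_congr_left hcong]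
  simp [pvG]

-- ===== VERDICT (by name: the statement is the Claim_ definition above) =====
theorem unique_spec : Claim_equal_unique := by
  intro nums _
  unfold Spec_unique
  rw [unique_eq_pvG, unique_alt_eq_pvG]
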